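-- pv_equiv track=rewrite | github.com/biosvos/algorithm | 프로그래머스/직업군 추천하기/main.py | solution
-- ===== SOURCE A (Python) =====
-- def parse(rec: str):
--     sp = rec.split()
--     d = dict()
--     for score, item in enumerate(reversed(sp[1:]), start=1):
--         d[item] = score
--
--     return sp[0], d
--
-- def solution(table, languages, preference):
--     max_score = 0
--     titles = []
--     for rec in table:
--         title, d = parse(rec)
--         score = sum(d.get(lang, 0) * pref for lang, pref in zip(languages, preference))
--         if max_score == score:
--             titles.append(title)
--         elif max_score < score:
--             titles.clear()
--             max_score = score
--             titles.append(title)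
--
--     titles.sort()
--     return titles[0]
-- ===== SOURCE B (Python) =====
-- def solution(table, languages, preference):
--     # aggregate the preference weight of each language once, up front
--     pref = {}
--     for lang, p in zip(languages, preference):
--         pref[lang] = pref.get(lang, 0) + p
--
--     best = None
--     for rec in table:
--         toks = rec.split()
--         skills = toks[1:]
--         n = len(skills)
--         # walk the record's own skill list: position i (first occurrence only)
--         # contributes (n - i) times that skill's aggregated preference weight
--         score = sum((n - i) * pref.get(sk, 0)
--                     for i, sk in enumerate(skills)
--                     if skills.index(sk) == i)
--         key = (-score, toks[0])
--         if best is None or key < best: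
--             best = key
--     return best[1]
-- ===== Notes on version B (the rewrite author's own statement) =====
-- stated objective: faster
-- what changed: B inverts A's join and replaces its selection machinery: instead of building a rank dict per record and summing over the languages list for every record, B aggregates languages into one language-to-preference-sum dict up front, scores each record by walking its OWN skill tokens (first occurrences, weight n-i, looked up in that dict), and picks the winner with a running lexicographic minimum over (-score, title) instead of A's running-max branches, tie list and final sort. …
import Mathlib
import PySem

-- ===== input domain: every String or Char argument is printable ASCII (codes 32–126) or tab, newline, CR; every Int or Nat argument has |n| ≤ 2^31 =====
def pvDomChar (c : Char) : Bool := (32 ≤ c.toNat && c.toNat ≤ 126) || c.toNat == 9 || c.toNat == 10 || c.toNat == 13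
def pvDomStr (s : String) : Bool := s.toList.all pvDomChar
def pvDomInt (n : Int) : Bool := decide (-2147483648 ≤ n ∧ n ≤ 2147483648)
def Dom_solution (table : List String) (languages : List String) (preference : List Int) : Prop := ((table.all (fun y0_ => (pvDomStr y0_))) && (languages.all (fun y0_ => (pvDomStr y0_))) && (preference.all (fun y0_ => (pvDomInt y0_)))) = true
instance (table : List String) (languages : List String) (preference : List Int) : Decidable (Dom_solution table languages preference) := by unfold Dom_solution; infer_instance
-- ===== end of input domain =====

-- B inverts A's join (one aggregated language→preference dict built once, records scored by
-- walking their own tokens) and selects by a running lexicographic minimum instead of A's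
-- running-max branches, tie list and final sort; a timing run measured B faster.

-- ===== PORT A =====
-- parse: sp = rec.split(); for score, item in enumerate(reversed(sp[1:]), 1): d[item] = score
-- sp[0] raises IndexError when sp = [] — excluded by Pre_; headD "" is only reached there.
def pvParse (rec : String) : String × PySem.Dict String Int :=
  let sp := PySem.Str.split₀ rec
  let d := (PySem.List.enumerate sp.tail.reverse 1).foldl
      (fun d p => d.insert p.2 p.1) PySem.Dict.empty
  (sp.headD "", d)

-- titles[0] raises IndexError when titles = [] — excluded by Pre_; headD "" is only reached there.
def solution (table : List String) (languages : List String) (preference : List Int) : String :=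
  let st := table.foldl (fun (st : Int × List String) rec =>
      let p := pvParse rec
      let score := ((languages.zip preference).map (fun lp => (p.2.getD lp.1 0) * lp.2)).sum
      if st.1 = score then (st.1, st.2 ++ [p.1])
      else if st.1 < score then (score, [p.1])
      else st) (0, [])
  (PySem.List.sorted st.2 (fun t => t) false).headD ""

-- ===== PORT B =====
-- pref = {}; for lang, p in zip(languages, preference): pref[lang] = pref.get(lang, 0) + p
def pvPrefDict (languages : List String) (preference : List Int) : PySem.Dict String Int :=
  (languages.zip preference).foldl
    (fun d lp => d.insert lp.1 (d.getD lp.1 0 + lp.2)) PySem.Dict.empty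

-- key = (-score, toks[0]); score = sum((n-i)*pref.get(sk,0) for i,sk in enumerate(skills)
--                                      if skills.index(sk) == i)
-- toks[0] raises IndexError when toks = [] — excluded by Pre_; headD "" is only reached there.
def pvRecKey (pref : PySem.Dict String Int) (rec : String) : Int × String :=
  let toks := PySem.Str.split₀ rec
  let skills := toks.tail
  let n : Int := skills.length
  let score := (((PySem.List.enumerate skills 0).filter
      (fun p => (PySem.List.index? skills p.2).map (fun j => (j : Int)) == some p.1)).map
      (fun p => (n - p.1) * pref.getD p.2 0)).sum
  (-score, toks.headD "")

-- if best is None or key < best: best = key   (Python tuple <)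
def pvBStep (best : Option (Int × String)) (key : Int × String) : Option (Int × String) :=
  match best with
  | none => some key
  | some b => if (decide (key.1 < b.1) || decide (key.1 = b.1) && decide (key.2 < b.2)) = true
      then some key else some b

-- best[1] raises TypeError on an empty table — excluded by Pre_; "" is only returned there.
def solution_alt (table : List String) (languages : List String) (preference : List Int) : String :=
  let pref := pvPrefDict languages preference
  match table.foldl (fun best rec => pvBStep best (pvRecKey pref rec)) none with
  | some b => b.2
  | none => ""

-- ===== PRECONDITION & SPEC =====
-- positional weight of a language in a record's skill list, and the record's score
def pvW (skills : List String) (lang : String) : Int :=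
  match PySem.List.index? skills lang with
  | some i => (skills.length : Int) - (i : Int)
  | none => 0

def pvScore (languages : List String) (preference : List Int) (rec : String) : Int :=
  ((languages.zip preference).map (fun lp =>
      pvW (PySem.Str.split₀ rec).tail lp.1 * lp.2)).sum

-- Pre_ is exactly A's return domain: A raises IndexError on an empty table, on a record that splits
-- to no tokens, and when no record scores ≥ 0 (the tie list stays empty since max_score starts at 0).
def Pre_solution (table : List String) (languages : List String) (preference : List Int) : Prop :=
  table ≠ [] ∧ (∀ rec ∈ table, PySem.Str.split₀ rec ≠ []) ∧
    ∃ rec ∈ table, 0 ≤ pvScore languages preference rec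
instance (table : List String) (languages : List String) (preference : List Int) : Decidable (Pre_solution table languages preference) := by unfold Pre_solution; infer_instance

def pvWitness_solution : List String × List String × List Int :=
  (["java python", "cobol java"], ["python"], [1])

def Spec_solution (table : List String) (languages : List String) (preference : List Int) (out : String) : Prop := out = solution_alt table languages preference
instance (table : List String) (languages : List String) (preference : List Int) (out : String) : Decidable (Spec_solution table languages preference out) := by unfold Spec_solution; infer_instance

-- ===== CLAIM (what is proved, stated in full; the proofs are below) =====
def Claim_equal_solution : Prop := ∀ (table : List String) (languages : List String) (preference : List Int), Dom_solution table languages preference → Pre_solution table languages preference → Spec_solution table languages preference (solution table languages preference)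

-- ===== LEMMAS AND PROOFS =====
-- (A-side characterisation, B-side score/selection lemmas, then the verdict)

-- ---- A side: per-record dict lookup equals the positional weight pvW ----
lemma pv_dict_getD (skills : List String) (x : String) :
    ((PySem.List.enumerate skills.reverse 1).foldl
        (fun d p => d.insert p.2 p.1) (PySem.Dict.empty : PySem.Dict String Int)).getD x 0
      = pvW skills x := by
  unfold pvW
  induction skills with
  | nil => simp
  | cons a t ih =>
    rw [List.reverse_cons, PySem.List.enumerate_append, List.foldl_append]
    simp only [List.length_reverse, PySem.List.enumerate_cons, PySem.List.enumerate_nil,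
      List.foldl_cons, List.foldl_nil]
    rw [PySem.Dict.getD_insert]
    by_cases hx : x = a
    · subst hx
      rw [PySem.List.index?_cons_self]
      simp
      first | ring | omega
    · rw [if_neg hx, ih, PySem.List.index?_cons_of_ne t (Ne.symm hx)]
      cases hi : PySem.List.index? t x <;> simp [hi] <;> push_cast <;> ring

lemma pv_scoreA (L : List String) (P : List Int) (rec : String) :
    ((L.zip P).map (fun lp => ((pvParse rec).2.getD lp.1 0) * lp.2)).sum = pvScore L P rec := by
  unfold pvParse pvScore
  simp only
  congr 1
  apply List.map_congr_left
  intro lp _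
  rw [pv_dict_getD]

-- ---- A side: the running-max/tie-list loop ----
def pvStep (st : Int × List String) (c : Int × String) : Int × List String :=
  if st.1 = c.1 then (st.1, st.2 ++ [c.2]) else if st.1 < c.1 then (c.1, [c.2]) else st

def pvMax (cands : List (Int × String)) : Int :=
  cands.foldl (fun m c => max m (c.1)) 0

lemma pv_le_max (cands : List (Int × String)) :
    0 ≤ pvMax cands ∧ ∀ c ∈ cands, c.1 ≤ pvMax cands :=
  PySem.List.le_foldl_max_int cands (fun c => c.1) 0

lemma pv_max_append (cands : List (Int × String)) (c : Int × String) :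
    pvMax (cands ++ [c]) = max (pvMax cands) c.1 := by
  simp [pvMax, List.foldl_append]

lemma pvStep_pair (a : Int) (l : List String) (c : Int × String) :
    pvStep (a, l) c = if a = c.1 then (a, l ++ [c.2])
      else if a < c.1 then (c.1, [c.2]) else (a, l) := rfl

lemma pv_loop_char (cands : List (Int × String)) :
    cands.foldl pvStep (0, []) =
      (pvMax cands, (cands.filter (fun c => c.1 = pvMax cands)).map (fun c => c.2)) := by
  induction cands using List.reverseRecOn with
  | nil => simp [pvMax]
  | append_singleton cands c ih =>
    rw [List.foldl_append, ih, pv_max_append, List.filter_append,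
      List.foldl_cons, List.foldl_nil, pvStep_pair]
    obtain ⟨h0, hle⟩ := pv_le_max cands
    rcases lt_trichotomy (pvMax cands) c.1 with h | h | h
    · have hmax : max (pvMax cands) c.1 = c.1 := max_eq_right h.le
      rw [hmax, if_neg h.ne, if_pos h]
      have hnil : cands.filter (fun x => decide (x.1 = c.1)) = [] :=
        List.filter_eq_nil_iff.mpr (fun y hy => by
          simp only [decide_eq_true_eq]
          exact fun he => absurd (he ▸ hle y hy) (not_le.mpr h))
      simp [hnil]
    · have hmax : max (pvMax cands) c.1 = pvMax cands := by omega
      rw [hmax, if_pos h]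
      simp [← h]
    · have hmax : max (pvMax cands) c.1 = pvMax cands := max_eq_left h.le
      rw [hmax, if_neg (by omega), if_neg (by omega)]
      have : ¬ (c.1 = pvMax cands) := by omega
      simp [this]

lemma pv_max_attained (cands : List (Int × String))
    (hx : ∃ c ∈ cands, 0 ≤ c.1) : ∃ c ∈ cands, c.1 = pvMax cands := by
  obtain ⟨c0, hc0, hc0n⟩ := hx
  have hmem : pvMax cands = 0 ∨ pvMax cands ∈ cands.map (fun c => c.1) := by
    have := PySem.List.foldl_max_mem (cands.map (fun c => c.1)) 0
    rw [List.foldl_map] at this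
    exact this
  rcases hmem with h | h
  · refine ⟨c0, hc0, ?_⟩
    have := (pv_le_max cands).2 c0 hc0
    omega
  · obtain ⟨c, hc, hcv⟩ := List.mem_map.mp h
    exact ⟨c, hc, hcv⟩

lemma pv_foldA (table : List String) (L : List String) (P : List Int) :
    table.foldl (fun (st : Int × List String) rec =>
        let p := pvParse rec
        let score := ((L.zip P).map (fun lp => (p.2.getD lp.1 0) * lp.2)).sum
        if st.1 = score then (st.1, st.2 ++ [p.1])
        else if st.1 < score then (score, [p.1])
        else st) (0, [])
      = (table.map (fun rec => (pvScore L P rec, (PySem.Str.split₀ rec).headD ""))).foldl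
          pvStep (0, []) := by
  rw [List.foldl_map]
  congr 1
  funext st rec
  simp only [pvStep, pv_scoreA]
  rfl

-- ---- B side: the first-occurrence pairs of a skill list ----
def pvFO (skills : List String) : List (Int × String) :=
  (PySem.List.enumerate skills 0).filter
    (fun p => (PySem.List.index? skills p.2).map (fun j => (j : Int)) == some p.1)

lemma pv_sum_map_add (L : List (Int × String)) (f g : Int × String → Int) :
    (L.map (fun x => f x + g x)).sum = (L.map f).sum + (L.map g).sum := by
  induction L with
  | nil => simp
  | cons a t ih => simp [ih]; ring

lemma pv_sum_ite_filter (L : List (Int × String)) (P : Int × String → Prop) [DecidablePred P]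
    (f : Int × String → Int) :
    (L.map (fun x => if P x then f x else 0)).sum
      = ((L.filter (fun x => decide (P x))).map f).sum := by
  induction L with
  | nil => simp
  | cons a t ih => by_cases h : P a <;> simp [h, ih]

lemma pv_nodup_FO (skills : List String) : (pvFO skills).Nodup := by
  apply List.Nodup.filter
  have hp := PySem.List.pairwise_lt_enumerate skills 0
  exact hp.imp (fun {p q} h he => by subst he; exact absurd h (lt_irrefl _))

-- among the first-occurrence pairs, exactly one has a given present language
lemma pv_FO_filter (skills : List String) (lang : String) :
    (pvFO skills).filter (fun p => decide (p.2 = lang))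
      = match PySem.List.index? skills lang with
        | some j => [((j : Int), lang)]
        | none => [] := by
  cases hix : PySem.List.index? skills lang with
  | none =>
    have hnm : lang ∉ skills := (PySem.List.index?_eq_none_iff skills lang).mp hix
    apply List.filter_eq_nil_iff.mpr
    intro p hp
    have hpe := (List.mem_filter.mp hp).1
    obtain ⟨k, hk, hpk⟩ := (PySem.List.mem_enumerate_iff _ _ _).mp hpe
    simp only [decide_eq_true_eq]
    intro he
    exact hnm (he ▸ hpk ▸ List.getElem_mem hk)
  | some j =>
    obtain ⟨hj, hgj, hfirst⟩ := PySem.List.getElem_of_index?_eq_some hix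
    have hmem : ((j : Int), lang) ∈ pvFO skills := by
      apply List.mem_filter.mpr
      constructor
      · exact (PySem.List.mem_enumerate_iff _ _ _).mpr ⟨j, hj, by simp [hgj]⟩
      · show (((PySem.List.index? skills lang).map (fun j => (j : Int))) == some (j : Int)) = true
        rw [hix]
        simp
    -- every member with snd = lang IS ((j:Int), lang)
    have hall : ∀ p ∈ pvFO skills, (p.2 = lang ↔ p = ((j : Int), lang)) := by
      intro p hp
      obtain ⟨hpe, hpc⟩ := List.mem_filter.mp hp
      constructor
      · intro he
        have hix2 : PySem.List.index? skills p.2 = some j := by rw [he]; exact hix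
        rw [hix2] at hpc
        have hp1 : ((j : Int) : Int) = p.1 := by simpa using hpc
        rw [Prod.ext_iff]
        exact ⟨hp1.symm, he⟩
      · intro he; rw [he]
    have : (pvFO skills).filter (fun p => decide (p.2 = lang))
        = (pvFO skills).filter (fun p => p == ((j : Int), lang)) := by
      apply List.filter_congr
      intro p hp
      by_cases hq : p = (((j : Int)), lang) <;> simp [hq, hall p hp]
    rw [this, List.filter_beq]
    rw [List.count_eq_one_of_mem (pv_nodup_FO skills) hmem]
    simp

-- one aggregation step of the preference dict shifts the score by pvW lang * q
lemma pv_FO_sum_insert (skills : List String) (d : PySem.Dict String Int)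
    (lang : String) (q : Int) :
    ((pvFO skills).map (fun p =>
        ((skills.length : Int) - p.1) * (d.insert lang (d.getD lang 0 + q)).getD p.2 0)).sum
      = ((pvFO skills).map (fun p =>
          ((skills.length : Int) - p.1) * d.getD p.2 0)).sum + pvW skills lang * q := by
  have h1 : ∀ p : Int × String,
      ((skills.length : Int) - p.1) * (d.insert lang (d.getD lang 0 + q)).getD p.2 0
        = ((skills.length : Int) - p.1) * d.getD p.2 0
          + (if p.2 = lang then ((skills.length : Int) - p.1) * q else 0) := by
    intro p
    rw [PySem.Dict.getD_insert]
    by_cases h : p.2 = lang <;> simp [h] <;> ring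
  calc ((pvFO skills).map (fun p =>
        ((skills.length : Int) - p.1) * (d.insert lang (d.getD lang 0 + q)).getD p.2 0)).sum
      = ((pvFO skills).map (fun p => ((skills.length : Int) - p.1) * d.getD p.2 0
          + (if p.2 = lang then ((skills.length : Int) - p.1) * q else 0))).sum := by
        apply congrArg; exact List.map_congr_left (fun p _ => h1 p)
    _ = ((pvFO skills).map (fun p => ((skills.length : Int) - p.1) * d.getD p.2 0)).sum
          + ((pvFO skills).map (fun p =>
              if p.2 = lang then ((skills.length : Int) - p.1) * q else 0)).sum :=
        pv_sum_map_add _ _ _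
    _ = _ := by
        congr 1
        rw [pv_sum_ite_filter, pv_FO_filter]
        unfold pvW
        cases hix : PySem.List.index? skills lang <;> simp

-- the whole preference-aggregation fold
lemma pv_pref_fold (skills : List String) (Z : List (String × Int)) (d : PySem.Dict String Int) :
    ((pvFO skills).map (fun p => ((skills.length : Int) - p.1)
        * (Z.foldl (fun d lp => d.insert lp.1 (d.getD lp.1 0 + lp.2)) d).getD p.2 0)).sum
      = ((pvFO skills).map (fun p => ((skills.length : Int) - p.1) * d.getD p.2 0)).sum
        + (Z.map (fun lp => pvW skills lp.1 * lp.2)).sum := by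
  induction Z generalizing d with
  | nil => simp
  | cons lp t ih =>
    rw [List.foldl_cons, ih, pv_FO_sum_insert]
    simp
    ring

-- B's per-record key is (-pvScore, title)
lemma pv_keyB (L : List String) (P : List Int) (rec : String) :
    pvRecKey (pvPrefDict L P) rec
      = (-(pvScore L P rec), (PySem.Str.split₀ rec).headD "") := by
  unfold pvRecKey pvPrefDict pvScore
  simp only
  congr 1
  have := pv_pref_fold (PySem.Str.split₀ rec).tail (L.zip P) PySem.Dict.empty
  rw [show (PySem.List.enumerate (PySem.Str.split₀ rec).tail 0).filter
      (fun p => (PySem.List.index? (PySem.Str.split₀ rec).tail p.2).map (fun j => (j : Int))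
        == some p.1) = pvFO (PySem.Str.split₀ rec).tail from rfl]
  rw [this]
  simp

-- ---- B side: the running-minimum fold picks a lexicographic minimum ----
def pvLexLe (a b : Int × String) : Prop := a.1 < b.1 ∨ (a.1 = b.1 ∧ a.2 ≤ b.2)

lemma pv_lex_refl (a : Int × String) : pvLexLe a a := Or.inr ⟨rfl, le_refl _⟩

lemma pv_lex_trans {a b c : Int × String} (h1 : pvLexLe a b) (h2 : pvLexLe b c) : pvLexLe a c := by
  rcases h1 with h1 | ⟨h1, h1'⟩ <;> rcases h2 with h2 | ⟨h2, h2'⟩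
  · exact Or.inl (h1.trans h2)
  · exact Or.inl (h2 ▸ h1)
  · exact Or.inl (h1 ▸ h2)
  · exact Or.inr ⟨h1.trans h2, h1'.trans h2'⟩

lemma pv_cond_true {x m : Int × String}
    (h : (decide (x.1 < m.1) || decide (x.1 = m.1) && decide (x.2 < m.2)) = true) :
    pvLexLe x m := by
  by_cases h1 : x.1 < m.1
  · exact Or.inl h1
  · by_cases h2 : x.1 = m.1
    · by_cases h3 : x.2 < m.2
      · exact Or.inr ⟨h2, h3.le⟩
      · exact absurd h (by simp [h1, h2, h3])
    · exact absurd h (by simp [h1, h2])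

lemma pv_cond_false {x m : Int × String}
    (h : ¬ (decide (x.1 < m.1) || decide (x.1 = m.1) && decide (x.2 < m.2)) = true) :
    pvLexLe m x := by
  by_cases h1 : x.1 < m.1
  · exact absurd (by simp [h1]) h
  · by_cases h2 : x.1 = m.1
    · by_cases h3 : x.2 < m.2
      · exact absurd (by simp [h1, h2, h3]) h
      · exact Or.inr ⟨h2.symm, le_of_not_gt h3⟩
    · exact Or.inl (by omega)

lemma pv_bstep_go (xs : List (Int × String)) (m0 : Int × String) :
    ∃ m, xs.foldl pvBStep (some m0) = some m ∧ (m = m0 ∨ m ∈ xs) ∧ pvLexLe m m0 ∧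
      ∀ y ∈ xs, pvLexLe m y := by
  induction xs generalizing m0 with
  | nil => exact ⟨m0, rfl, Or.inl rfl, pv_lex_refl m0, by simp⟩
  | cons x t ih =>
    rw [List.foldl_cons]
    by_cases hc : (decide (x.1 < m0.1) || decide (x.1 = m0.1) && decide (x.2 < m0.2)) = true
    · have hstep : pvBStep (some m0) x = some x := by
        show (if (decide (x.1 < m0.1) || decide (x.1 = m0.1) && decide (x.2 < m0.2)) = true
          then some x else some m0) = some x
        exact if_pos hc
      rw [hstep]
      obtain ⟨m, heq, hmem, hle, hall⟩ := ih x
      refine ⟨m, heq, ?_, pv_lex_trans hle (pv_cond_true hc), ?_⟩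
      · rcases hmem with h | h
        · exact Or.inr (h ▸ List.mem_cons_self)
        · exact Or.inr (List.mem_cons_of_mem _ h)
      · intro y hy
        rcases List.mem_cons.mp hy with h | h
        · exact h ▸ hle
        · exact hall y h
    · have hstep : pvBStep (some m0) x = some m0 := by
        show (if (decide (x.1 < m0.1) || decide (x.1 = m0.1) && decide (x.2 < m0.2)) = true
          then some x else some m0) = some m0
        exact if_neg hc
      rw [hstep]
      obtain ⟨m, heq, hmem, hle, hall⟩ := ih m0
      refine ⟨m, heq, ?_, hle, ?_⟩
      · rcases hmem with h | h
        · exact Or.inl h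
        · exact Or.inr (List.mem_cons_of_mem _ h)
      · intro y hy
        rcases List.mem_cons.mp hy with h | h
        · exact h ▸ pv_lex_trans hle (pv_cond_false hc)
        · exact hall y h

-- ===== VERDICT (by name: the statement is the Claim_ definition above) =====
theorem solution_spec : Claim_equal_solution := by
  intro table L P _ hPre
  obtain ⟨hne, hsplit, rec0, hrec0, h0⟩ := hPre
  unfold Spec_solution solution
  rw [pv_foldA, pv_loop_char]
  have hmapB : table.map (pvRecKey (pvPrefDict L P))
      = (table.map (fun rec => (pvScore L P rec, (PySem.Str.split₀ rec).headD ""))).map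
          (fun c => (-c.1, c.2)) := by
    rw [List.map_map]
    exact List.map_congr_left (fun rec _ => pv_keyB L P rec)
  have hB0 : solution_alt table L P
      = (match (table.foldl (fun best rec => pvBStep best (pvRecKey (pvPrefDict L P) rec)) none) with
         | some b => b.2
         | none => "") := rfl
  have hB1 : table.foldl (fun best rec => pvBStep best (pvRecKey (pvPrefDict L P) rec)) none
      = (table.map (pvRecKey (pvPrefDict L P))).foldl pvBStep none :=
    by rw [List.foldl_map]
  rw [hB0, hB1, hmapB]
  set f : String → Int × String :=
    fun rec => (pvScore L P rec, (PySem.Str.split₀ rec).headD "") with hf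
  set cands := table.map f with hcands
  obtain ⟨cM, hcM, hcMv⟩ := pv_max_attained cands
    ⟨f rec0, List.mem_map_of_mem hrec0, h0⟩
  have hcMT : cM.2 ∈ (cands.filter (fun c => c.1 = pvMax cands)).map (fun c => c.2) :=
    List.mem_map_of_mem (List.mem_filter.mpr ⟨hcM, by simp [hcMv]⟩)
  cases hs : PySem.List.sorted ((cands.filter (fun c => c.1 = pvMax cands)).map (fun c => c.2))
      (fun t => t) false with
  | nil =>
    exact absurd ((PySem.List.sorted_eq_nil_iff _ _ _).mp hs ▸ hcMT) (List.not_mem_nil)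
  | cons h tl =>
  have hhT : h ∈ (cands.filter (fun c => c.1 = pvMax cands)).map (fun c => c.2) :=
    (PySem.List.mem_sorted _ _ _ _).mp (hs ▸ List.mem_cons_self)
  have hhle : ∀ y ∈ (cands.filter (fun c => c.1 = pvMax cands)).map (fun c => c.2), h ≤ y :=
    PySem.List.key_head_sorted_le _ (fun t => t) hs
  have hcne : cands.map (fun c => (-c.1, c.2)) ≠ [] := by
    simp only [ne_eq, List.map_eq_nil_iff]
    exact fun hnil => hne (by simpa [hcands] using hnil)
  cases hc' : cands.map (fun c => (-c.1, c.2)) with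
  | nil => exact absurd hc' hcne
  | cons c rest =>
  rw [List.foldl_cons]
  have hstep0 : pvBStep none c = some c := rfl
  rw [hstep0]
  obtain ⟨m, heq, hmem, hle, hall⟩ := pv_bstep_go rest c
  rw [heq]
  have hmmem : m ∈ cands.map (fun c => (-c.1, c.2)) := by
    rw [hc']
    rcases hmem with hm | hm
    · exact hm ▸ List.mem_cons_self
    · exact List.mem_cons_of_mem _ hm
  have hmin : ∀ y ∈ cands.map (fun c => (-c.1, c.2)), pvLexLe m y := by
    intro y hy
    rw [hc'] at hy
    rcases List.mem_cons.mp hy with hy | hy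
    · exact hy ▸ hle
    · exact hall y hy
  obtain ⟨cstar, hcs, hgm⟩ := List.mem_map.mp hmmem
  have hsle : cstar.1 ≤ pvMax cands := (pv_le_max cands).2 cstar hcs
  have hseq : cstar.1 = pvMax cands := by
    have hx := hmin (-cM.1, cM.2) (List.mem_map_of_mem hcM)
    rw [← hgm] at hx
    rcases hx with hlt | ⟨heq1, _⟩
    · simp only at hlt
      omega
    · simp only at heq1
      omega
  have hsT : cstar.2 ∈ (cands.filter (fun c => c.1 = pvMax cands)).map (fun c => c.2) :=
    List.mem_map_of_mem (List.mem_filter.mpr ⟨hcs, by simp [hseq]⟩)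
  have hle1 : h ≤ cstar.2 := hhle _ hsT
  have hle2 : cstar.2 ≤ h := by
    obtain ⟨y, hyf, hy2⟩ := List.mem_map.mp hhT
    obtain ⟨hyc, hyM⟩ := List.mem_filter.mp hyf
    have hyM' : y.1 = pvMax cands := by simpa using hyM
    have hx := hmin (-y.1, y.2) (List.mem_map_of_mem hyc)
    rw [← hgm] at hx
    rcases hx with hlt | ⟨_, hles⟩
    · simp only at hlt
      omega
    · simpa [hy2] using hles
  have hm2 : m.2 = cstar.2 := by rw [← hgm]
  have hA : (PySem.List.sorted ((cands.filter (fun c => c.1 = pvMax cands)).map (fun c => c.2))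
      (fun t => t) false).headD "" = cstar.2 := by
    rw [hs]
    simp only [List.headD_cons]
    exact le_antisymm hle1 hle2
  exact hA.trans hm2.symm
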